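-- pv_equiv track=rewrite | github.com/alejandrommingo/LISBETH | src/subspace_analysis/anchors.py | _char_to_token_span
-- ===== SOURCE A (Python) =====
-- def _char_to_token_span(offset_mapping, char_start, char_end):
--     tokens_indices = []
--     for i, (start, end) in enumerate(offset_mapping):
--         if end == 0 and start == 0: continue
--         if end > char_start and start < char_end:
--              tokens_indices.append(i)
--     if not tokens_indices: return None, None
--     return tokens_indices[0], tokens_indices[-1] + 1
-- ===== SOURCE B (Python) =====
-- def _char_to_token_span(offset_mapping, char_start, char_end):
--     def hit(pair):
--         start, end = pair
--         return not (end == 0 and start == 0) and end > char_start and start < char_end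
--
--     first = None
--     for i, pair in enumerate(offset_mapping):
--         if hit(pair):
--             first = i
--             break
--     if first is None:
--         return None, None
--     last = first
--     for j in range(len(offset_mapping) - 1, -1, -1):
--         if hit(offset_mapping[j]):
--             last = j
--             break
--     return first, last + 1
-- ===== Notes on version B (the rewrite author's own statement) =====
-- stated objective: alternative
-- what changed: Instead of materialising the full list of all matching token indices and reading its first/last element, B finds the first matching index with a forward scan that stops early and the last one with a separate backward scan that stops early; no list is built.
import Mathlib
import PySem

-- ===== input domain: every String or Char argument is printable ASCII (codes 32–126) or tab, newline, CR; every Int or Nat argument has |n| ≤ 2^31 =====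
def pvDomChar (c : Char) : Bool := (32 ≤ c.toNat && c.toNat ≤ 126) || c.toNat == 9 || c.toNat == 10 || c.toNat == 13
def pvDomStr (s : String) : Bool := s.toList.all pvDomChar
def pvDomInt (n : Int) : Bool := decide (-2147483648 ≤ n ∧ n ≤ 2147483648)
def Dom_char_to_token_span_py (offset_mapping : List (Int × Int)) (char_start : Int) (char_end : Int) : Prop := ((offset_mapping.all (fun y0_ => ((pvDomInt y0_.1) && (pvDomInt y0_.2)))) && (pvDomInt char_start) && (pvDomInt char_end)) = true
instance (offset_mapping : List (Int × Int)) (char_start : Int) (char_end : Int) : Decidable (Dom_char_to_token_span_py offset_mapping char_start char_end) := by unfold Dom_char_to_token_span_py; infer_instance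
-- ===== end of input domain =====

-- B replaces A's full index-list construction by two separate early-exit scans (forward for the first overlapping token, backward for the last); alternative decomposition, same O(n) cost.
-- ===== PORT A =====
-- transliteration of A's loop: collect every matching index in order, then read ends
def pvAux (char_start char_end : Int) : List (Int × Int) → Int → List Int
  | [], _ => []
  | (start, «end») :: rest, i =>
    if «end» = 0 ∧ start = 0 then pvAux char_start char_end rest (i + 1)
    else if «end» > char_start ∧ start < char_end then i :: pvAux char_start char_end rest (i + 1)
    else pvAux char_start char_end rest (i + 1)

def char_to_token_span_py (offset_mapping : List (Int × Int)) (char_start : Int) (char_end : Int) : Option Int × Option Int :=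
  let tokens_indices := pvAux char_start char_end offset_mapping 0
  if tokens_indices.isEmpty then (none, none)
  else (tokens_indices.head?, tokens_indices.getLast?.map (· + 1))

-- ===== PORT B =====
-- B: two early-exit scans, no list: forward for the first index, backward for the last
def pvHit (char_start char_end : Int) (p : Int × Int) : Bool :=
  !(p.2 == 0 && p.1 == 0) && decide (p.2 > char_start) && decide (p.1 < char_end)

def pvFindFirst (char_start char_end : Int) : List (Int × Int) → Int → Option Int
  | [], _ => none
  | p :: rest, i => if pvHit char_start char_end p then some i
                    else pvFindFirst char_start char_end rest (i + 1)

-- backward scan: walks the reversed list with a decreasing index j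
def pvFindBack (char_start char_end : Int) : List (Int × Int) → Int → Option Int
  | [], _ => none
  | p :: rest, j => if pvHit char_start char_end p then some j
                    else pvFindBack char_start char_end rest (j - 1)

def char_to_token_span_py_alt (offset_mapping : List (Int × Int)) (char_start : Int) (char_end : Int) : Option Int × Option Int :=
  match pvFindFirst char_start char_end offset_mapping 0 with
  | none => (none, none)
  | some f =>
    let last := (pvFindBack char_start char_end offset_mapping.reverse ((offset_mapping.length : Int) - 1)).getD f
    (some f, some (last + 1))

-- ===== PRECONDITION & SPEC =====
def Spec_char_to_token_span_py (offset_mapping : List (Int × Int)) (char_start : Int) (char_end : Int) (out : Option Int × Option Int) : Prop := out = char_to_token_span_py_alt offset_mapping char_start char_end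
instance (offset_mapping : List (Int × Int)) (char_start : Int) (char_end : Int) (out : Option Int × Option Int) : Decidable (Spec_char_to_token_span_py offset_mapping char_start char_end out) := by unfold Spec_char_to_token_span_py; infer_instance

-- ===== CLAIM (what is proved, stated in full; the proofs are below) =====
def Claim_equal_char_to_token_span_py : Prop := ∀ (offset_mapping : List (Int × Int)) (char_start : Int) (char_end : Int), Dom_char_to_token_span_py offset_mapping char_start char_end → Spec_char_to_token_span_py offset_mapping char_start char_end (char_to_token_span_py offset_mapping char_start char_end)

-- ===== LEMMAS AND PROOFS =====

lemma pvHit_iff (cs ce s e : Int) :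
    pvHit cs ce (s, e) = true ↔ ¬(e = 0 ∧ s = 0) ∧ e > cs ∧ s < ce := by
  simp [pvHit]; tauto

lemma pv_getLast?_cons {α : Type} (x : α) (t : List α) :
    (x :: t).getLast? = (t.getLast?).or (some x) := by
  cases h : t.getLast? with
  | none => simp [List.getLast?_eq_none_iff.mp h]
  | some y =>
    rcases List.getLast?_eq_some_iff.mp h with ⟨t', rfl⟩
    have : x :: (t' ++ [y]) = (x :: t') ++ [y] := by simp
    rw [this, List.getLast?_concat]
    simp

lemma pv_findBack_append (cs ce : Int) (a b : List (Int × Int)) (j : Int) :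
    pvFindBack cs ce (a ++ b) j
      = (pvFindBack cs ce a j).or (pvFindBack cs ce b (j - a.length)) := by
  induction a generalizing j with
  | nil => simp [pvFindBack]
  | cons p rest ih =>
    simp only [List.cons_append, pvFindBack]
    by_cases hp : pvHit cs ce p
    · simp [hp]
    · simp only [hp, Bool.false_eq_true, if_false, ih]
      congr 2
      push_cast [List.length_cons]
      ring

lemma pv_head?_eq (cs ce : Int) (l : List (Int × Int)) (i : Int) :
    (pvAux cs ce l i).head? = pvFindFirst cs ce l i := by
  induction l generalizing i with
  | nil => simp [pvAux, pvFindFirst]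
  | cons p rest ih =>
    obtain ⟨s, e⟩ := p
    simp only [pvAux, pvFindFirst]
    by_cases h0 : e = 0 ∧ s = 0
    · obtain ⟨rfl, rfl⟩ := h0
      have hh : pvHit cs ce ((0 : Int), (0 : Int)) = false := by simp [pvHit]
      simp [hh, ih]
    · by_cases h1 : e > cs ∧ s < ce
      · have hh : pvHit cs ce (s, e) = true := (pvHit_iff cs ce s e).mpr ⟨h0, h1⟩
        simp [h0, h1, hh]
      · have hh : pvHit cs ce (s, e) = false := by
          rw [Bool.eq_false_iff]
          intro hc
          exact h1 ((pvHit_iff cs ce s e).mp hc).2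
        simp [h0, h1, hh, ih]

lemma pv_getLast?_eq (cs ce : Int) (l : List (Int × Int)) (i : Int) :
    (pvAux cs ce l i).getLast? = pvFindBack cs ce l.reverse (i + l.length - 1) := by
  induction l generalizing i with
  | nil => simp [pvAux, pvFindBack]
  | cons p rest ih =>
    obtain ⟨s, e⟩ := p
    have hlen : i + (((s, e) :: rest).length : Int) - 1 = i + (rest.length : Int) + 1 - 1 := by
      push_cast [List.length_cons]; ring
    rw [hlen]
    have hrev : ((s, e) :: rest).reverse = rest.reverse ++ [(s, e)] := by simp
    rw [hrev, pv_findBack_append]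
    have hIH : pvFindBack cs ce rest.reverse (i + (rest.length : Int) + 1 - 1)
        = (pvAux cs ce rest (i + 1)).getLast? := by
      rw [ih (i + 1)]; congr 1; ring
    rw [hIH]
    have hidx : (i + (rest.length : Int) + 1 - 1) - ((rest.reverse).length : Int) = i := by
      push_cast [List.length_reverse]; ring
    rw [hidx]
    simp only [pvAux]
    by_cases h0 : e = 0 ∧ s = 0
    · obtain ⟨rfl, rfl⟩ := h0
      have hh : pvHit cs ce ((0 : Int), (0 : Int)) = false := by simp [pvHit]
      simp [pvFindBack, hh]
    · by_cases h1 : e > cs ∧ s < ce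
      · have hh : pvHit cs ce (s, e) = true := (pvHit_iff cs ce s e).mpr ⟨h0, h1⟩
        simp only [h0, if_false, h1, if_true, pvFindBack, hh]
        exact pv_getLast?_cons i _
      · have hh : pvHit cs ce (s, e) = false := by
          rw [Bool.eq_false_iff]
          intro hc
          exact h1 ((pvHit_iff cs ce s e).mp hc).2
        simp [h0, h1, pvFindBack, hh]

-- ===== VERDICT (by name: the statement is the Claim_ definition above) =====
theorem char_to_token_span_py_spec : Claim_equal_char_to_token_span_py := by
  intro om cs ce _
  unfold Spec_char_to_token_span_py char_to_token_span_py char_to_token_span_py_alt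
  have hh := pv_head?_eq cs ce om 0
  have hl := pv_getLast?_eq cs ce om 0
  cases hf : pvFindFirst cs ce om 0 with
  | none =>
    have hnil : pvAux cs ce om 0 = [] := List.head?_eq_none_iff.mp (hf ▸ hh)
    simp [hnil]
  | some f =>
    have hne : pvAux cs ce om 0 ≠ [] := by
      intro h
      rw [h, hf] at hh
      simp at hh
    cases hg : (pvAux cs ce om 0).getLast? with
    | none => exact absurd (List.getLast?_eq_none_iff.mp hg) hne
    | some g =>
      have hb : pvFindBack cs ce om.reverse ((om.length : Int) - 1) = some g := by
        rw [← hg, hl]; congr 1; ring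
      simp [List.isEmpty_eq_false_iff.mpr hne, hh, hf, hg, hb]
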